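-- pv_equiv track=rewrite | github.com/karthikeyad-pnnl/modelica-buildings | VM_script/utilities.py | delete_number_of_lines
-- ===== SOURCE A (Python) =====
-- def delete_number_of_lines(lines, start_line = 0, end_line = 0, number_of_lines = 0):
--     """
--     Deletes lines with line-index starting at start_line and up to end_line. number_of_lines can also be used in lieu of end_line. Returns text with lines removed.
--     """
--
--     if end_line == 0:
--         end_line = start_line + number_of_lines
--
--     modified_text_data = []
--
--     for line_index, line in enumerate(lines):
--         if line_index < end_line:
--             line = ''
--         modified_text_data.append(line)
--
--     return modified_text_data
-- ===== SOURCE B (Python) =====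
-- def delete_number_of_lines(lines, start_line = 0, end_line = 0, number_of_lines = 0):
--     """
--     Deletes lines with line-index starting at start_line and up to end_line. number_of_lines can also be used in lieu of end_line. Returns text with lines removed.
--     """
--     if end_line == 0:
--         end_line = start_line + number_of_lines
--     k = min(max(end_line, 0), len(lines))
--     return [''] * k + list(lines[k:])
-- ===== Notes on version B (the rewrite author's own statement) =====
-- stated objective: simpler
-- what changed: Replaces the per-element enumerate loop with a closed-form clamped boundary k = min(max(end_line,0), len(lines)) and builds the result as two bulk pieces: k blank strings concatenated with the tail slice lines[k:].
import Mathlib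
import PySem

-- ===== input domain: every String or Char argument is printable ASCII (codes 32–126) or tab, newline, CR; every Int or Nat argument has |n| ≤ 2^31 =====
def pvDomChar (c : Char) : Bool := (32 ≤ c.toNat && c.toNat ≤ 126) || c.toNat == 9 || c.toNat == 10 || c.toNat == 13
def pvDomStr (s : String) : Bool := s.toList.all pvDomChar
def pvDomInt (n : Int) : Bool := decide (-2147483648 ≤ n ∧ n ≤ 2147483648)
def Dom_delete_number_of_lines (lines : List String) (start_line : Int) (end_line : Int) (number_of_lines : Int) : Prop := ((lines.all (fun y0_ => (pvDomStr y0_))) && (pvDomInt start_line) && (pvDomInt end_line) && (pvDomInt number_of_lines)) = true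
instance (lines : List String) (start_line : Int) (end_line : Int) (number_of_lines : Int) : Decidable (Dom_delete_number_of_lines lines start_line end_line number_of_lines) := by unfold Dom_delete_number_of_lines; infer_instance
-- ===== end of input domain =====

-- B replaces A's per-element enumerate loop by a closed-form clamped boundary and two bulk pieces (replicate + slice); objective: simpler.


-- ===== PORT A =====
def delete_number_of_lines (lines : List String) (start_line : Int) (end_line : Int) (number_of_lines : Int) : List String :=
  let e := if end_line = 0 then start_line + number_of_lines else end_line
  (PySem.List.enumerate lines 0).foldl
    (fun acc p => acc ++ [if p.1 < e then "" else p.2]) ([] : List String)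

-- ===== PORT B =====
def delete_number_of_lines_alt (lines : List String) (start_line : Int) (end_line : Int) (number_of_lines : Int) : List String :=
  let e := if end_line = 0 then start_line + number_of_lines else end_line
  let k := min (max e 0) (lines.length : Int)
  List.replicate k.toNat "" ++ PySem.List.slice lines (some k) none

-- ===== PRECONDITION & SPEC =====
def Spec_delete_number_of_lines (lines : List String) (start_line : Int) (end_line : Int) (number_of_lines : Int) (out : List String) : Prop := out = delete_number_of_lines_alt lines start_line end_line number_of_lines
instance (lines : List String) (start_line : Int) (end_line : Int) (number_of_lines : Int) (out : List String) : Decidable (Spec_delete_number_of_lines lines start_line end_line number_of_lines out) := by unfold Spec_delete_number_of_lines; infer_instance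

-- ===== CLAIM (what is proved, stated in full; the proofs are below) =====
def Claim_equal_delete_number_of_lines : Prop := ∀ (lines : List String) (start_line : Int) (end_line : Int) (number_of_lines : Int), Dom_delete_number_of_lines lines start_line end_line number_of_lines → Spec_delete_number_of_lines lines start_line end_line number_of_lines (delete_number_of_lines lines start_line end_line number_of_lines)

-- ===== LEMMAS AND PROOFS =====

theorem dnol_foldl_snoc (l : List (Int × String)) (f : Int × String → String)
    (acc : List String) :
    l.foldl (fun a p => a ++ [f p]) acc = acc ++ l.map f := by
  induction l generalizing acc with
  | nil => simp
  | cons x xs ih => simp [List.foldl, ih]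

theorem dnol_map_enumerate (lines : List String) (s e : Int) :
    (PySem.List.enumerate lines s).map (fun p => if p.1 < e then "" else p.2)
      = List.replicate (min (e - s).toNat lines.length) "" ++ lines.drop (e - s).toNat := by
  induction lines generalizing s with
  | nil => simp
  | cons x xs ih =>
    rw [PySem.List.enumerate_cons]
    simp only [List.map_cons]
    by_cases h : s < e
    · have h1 : (e - s).toNat = (e - (s + 1)).toNat + 1 := by omega
      have h2 : min ((e - (s+1)).toNat + 1) (xs.length + 1)
          = min ((e - (s+1)).toNat) xs.length + 1 := by omega
      simp only [if_pos h, ih (s+1), h1, List.length_cons, h2, List.replicate_succ,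
        List.drop_succ_cons, List.cons_append]
    · have h1 : (e - s).toNat = 0 := by omega
      have h2 : (e - (s + 1)).toNat = 0 := by omega
      simp [if_neg h, ih (s+1), h1, h2]

theorem dnol_drop_min (xs : List String) (m : Nat) :
    xs.drop (min m xs.length) = xs.drop m := by
  rcases Nat.le_total m xs.length with h | h
  · rw [Nat.min_eq_left h]
  · rw [Nat.min_eq_right h, List.drop_length, List.drop_eq_nil_of_le h]

-- ===== VERDICT (by name: the statement is the Claim_ definition above) =====
theorem delete_number_of_lines_spec : Claim_equal_delete_number_of_lines := by
  intro lines start_line end_line number_of_lines _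
  unfold Spec_delete_number_of_lines delete_number_of_lines delete_number_of_lines_alt
  simp only []
  set e := if end_line = 0 then start_line + number_of_lines else end_line with he
  set k : Int := min (max e 0) (lines.length : Int) with hk
  have hk0 : 0 ≤ k := by positivity
  have hkn : k = ((k.toNat : Nat) : Int) := (Int.toNat_of_nonneg hk0).symm
  have hkt : k.toNat = min e.toNat lines.length := by omega
  rw [dnol_foldl_snoc, dnol_map_enumerate, hkn, PySem.List.slice_from_natCast, hkt]
  have : e - 0 = e := by ring
  rw [this, ← hkt, ← dnol_drop_min lines e.toNat, hkt]
  simp only [List.nil_append, Int.toNat_natCast]
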